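-- pv_equiv track=rewrite | github.com/0110Crypto0110/Karaoke | script.py | alinhar_palavras
-- ===== SOURCE A (Python) =====
-- def alinhar_palavras(lista_original, lista_usuario):
--     alinhado_usuario = []
--     idx = 0
--
--     for palavra in lista_original:
--         if idx < len(lista_usuario):
--             alinhado_usuario.append(lista_usuario[idx])
--             idx += 1
--         else:
--             alinhado_usuario.append("")
--
--     return alinhado_usuario
-- ===== SOURCE B (Python) =====
-- def alinhar_palavras(lista_original, lista_usuario):
--     n = len(lista_original)
--     return lista_usuario[:n] + [""] * max(0, n - len(lista_usuario))
-- ===== Notes on version B (the rewrite author's own statement) =====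
-- stated objective: simpler
-- what changed: Replaces the index-tracking loop with a per-element branch by a closed-form slice of the user list to len(lista_original) plus a computed pad of empty strings.
import Mathlib
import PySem

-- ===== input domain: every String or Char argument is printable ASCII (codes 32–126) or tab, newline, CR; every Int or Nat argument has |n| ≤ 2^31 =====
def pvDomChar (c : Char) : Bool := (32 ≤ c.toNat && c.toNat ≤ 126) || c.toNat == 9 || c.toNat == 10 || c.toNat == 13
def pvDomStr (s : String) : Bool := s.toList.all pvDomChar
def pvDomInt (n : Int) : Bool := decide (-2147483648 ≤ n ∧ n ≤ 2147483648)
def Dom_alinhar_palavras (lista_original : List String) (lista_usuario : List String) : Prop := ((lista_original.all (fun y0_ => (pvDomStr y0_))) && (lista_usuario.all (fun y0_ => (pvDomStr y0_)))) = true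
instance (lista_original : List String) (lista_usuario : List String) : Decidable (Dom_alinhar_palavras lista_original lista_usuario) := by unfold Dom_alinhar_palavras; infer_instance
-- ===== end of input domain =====

-- B replaces A's index-tracking loop-with-branch by a closed-form slice-plus-pad; objective: simpler.


-- ===== PORT A =====
-- the 'for palavra in lista_original' loop with mutable idx, building alinhado_usuario front-to-back;
-- lista_usuario[idx] is guarded by idx < len(lista_usuario), so getD is exact there
def alinhar_palavras_loop (lista_usuario : List String) : List String → Nat → List String
  | [], _ => []
  | _ :: rest, idx =>
    if idx < lista_usuario.length then
      lista_usuario.getD idx "" :: alinhar_palavras_loop lista_usuario rest (idx + 1)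
    else
      "" :: alinhar_palavras_loop lista_usuario rest idx

def alinhar_palavras (lista_original : List String) (lista_usuario : List String) : List String :=
  alinhar_palavras_loop lista_usuario lista_original 0

-- ===== PORT B =====
-- lista_usuario[:n] = take n; [""] * max(0, n - len u) = replicate (n - len u) with Nat truncated subtraction
def alinhar_palavras_alt (lista_original : List String) (lista_usuario : List String) : List String :=
  lista_usuario.take lista_original.length ++
    List.replicate (lista_original.length - lista_usuario.length) ""

-- ===== PRECONDITION & SPEC =====
def Spec_alinhar_palavras (lista_original : List String) (lista_usuario : List String) (out : List String) : Prop := out = alinhar_palavras_alt lista_original lista_usuario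
instance (lista_original : List String) (lista_usuario : List String) (out : List String) : Decidable (Spec_alinhar_palavras lista_original lista_usuario out) := by unfold Spec_alinhar_palavras; infer_instance

-- ===== CLAIM (what is proved, stated in full; the proofs are below) =====
def Claim_equal_alinhar_palavras : Prop := ∀ (lista_original : List String) (lista_usuario : List String), Dom_alinhar_palavras lista_original lista_usuario → Spec_alinhar_palavras lista_original lista_usuario (alinhar_palavras lista_original lista_usuario)

-- ===== LEMMAS AND PROOFS =====
theorem alinhar_palavras_loop_eq (u : List String) (o : List String) (idx : Nat) :
    alinhar_palavras_loop u o idx =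
      (u.drop idx).take o.length ++ List.replicate (o.length - (u.length - idx)) "" := by
  induction o generalizing idx with
  | nil => simp [alinhar_palavras_loop]
  | cons _ rest ih =>
    simp only [alinhar_palavras_loop, List.length_cons]
    split
    · rename_i h
      have hd : u.drop idx = u[idx] :: u.drop (idx + 1) := List.drop_eq_getElem_cons h
      have hc : rest.length + 1 - (u.length - idx) = rest.length - (u.length - (idx + 1)) := by omega
      rw [ih (idx + 1), hd, List.take_succ_cons, hc]
      simp [List.getD, List.getElem?_eq_getElem h]
    · rename_i h
      rw [ih idx]
      have hd : u.drop idx = [] := List.drop_eq_nil_of_le (by omega)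
      rw [hd]
      have h0 : u.length - idx = 0 := by omega
      simp [h0, List.replicate_succ]

-- ===== VERDICT (by name: the statement is the Claim_ definition above) =====
theorem alinhar_palavras_spec : Claim_equal_alinhar_palavras := by
  intro o u _
  unfold Spec_alinhar_palavras alinhar_palavras alinhar_palavras_alt
  rw [alinhar_palavras_loop_eq]
  simp
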